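-- pv_equiv track=rewrite | github.com/a-brandon/practice | edabit/interprime_numbers.py | interprime
-- ===== SOURCE A (Python) =====
-- def is_prime(n):
--     for i in range(2, n):
--         if n % i == 0:
--             return False
--     return True
--
-- def interprime(n):
--     if is_prime(n):
--         return []
--
--     nums = []
--     for i in range(n, 2, -1):
--         if is_prime(i):
--             nums.append(i)
--             break
--
--     prime = n + 1
--     while True:
--         if is_prime(prime) and prime > n:
--             nums.append(prime)
--             break
--         prime += 1
--
--     diff = n - nums[0]
--     if n - nums[0] and n + diff == nums[-1]:
--         return nums
--     return []
-- ===== SOURCE B (Python) =====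
-- def is_prime(n):
--     for i in range(2, n):
--         if n % i == 0:
--             return False
--     return True
--
-- def interprime(n):
--     # Single outward expansion: find the smallest distance d at which a prime
--     # (by the same naive test) appears on either side; interprime iff both sides
--     # are prime at that same distance.
--     if is_prime(n):
--         return []
--     d = 1
--     while not (is_prime(n - d) or is_prime(n + d)):
--         d += 1
--     if is_prime(n - d) and is_prime(n + d):
--         return [n - d, n + d]
--     return []
-- ===== Notes on version B (the rewrite author's own statement) =====
-- stated objective: simpler
-- what changed: A scans downward from n for the nearest lower prime and then upward in a separate unbounded loop for the nearest upper prime, then compares distances; B runs one outward-expanding loop to the smallest distance d at which either flank is prime and returns [n-d, n+d] exactly when both flanks are prime at that d.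
import Mathlib
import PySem

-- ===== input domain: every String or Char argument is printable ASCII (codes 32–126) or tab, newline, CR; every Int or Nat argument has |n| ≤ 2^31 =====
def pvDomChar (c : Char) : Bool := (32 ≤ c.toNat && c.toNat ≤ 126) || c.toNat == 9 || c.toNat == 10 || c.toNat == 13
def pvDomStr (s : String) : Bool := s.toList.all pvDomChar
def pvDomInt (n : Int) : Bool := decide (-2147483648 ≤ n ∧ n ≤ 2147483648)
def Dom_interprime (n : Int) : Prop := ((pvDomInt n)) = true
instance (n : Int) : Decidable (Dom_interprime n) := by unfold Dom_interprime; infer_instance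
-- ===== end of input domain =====

-- B replaces A's two directional prime scans by a single outward expansion to the
-- nearest prime-distance d, checking both flanks at that d (objective: simpler).

-- ===== PORT A =====
-- is_prime: trial division over range(2, n); early 'return False' = List.all
def isPrimeA (n : Int) : Bool :=
  (PySem.List.pyRange 2 n 1).all (fun i => !(PySem.Int.mod n i == 0))

-- the 'for i in range(n, 2, -1): if is_prime(i): append; break' loop
def firstDownA : List Int → List Int
  | [] => []
  | i :: rest => if isPrimeA i then [i] else firstDownA rest

-- the 'while True' upward scan; fuel is only a totality guard (proved unreachable
-- with the fuel interprime passes, on every input where Python A runs this loop)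
def upA (n : Int) : Nat → Int → Int
  | 0, p => p
  | fuel + 1, p => if isPrimeA p && decide (n < p) then p else upA n fuel (p + 1)

def interprime (n : Int) : List Int :=
  if isPrimeA n then []
  else
    let nums := firstDownA (PySem.List.pyRange n 2 (-1))
    let nums := nums ++ [upA n (2 * n.toNat + 4) (n + 1)]
    match PySem.List.pyGet? nums 0, PySem.List.pyGet? nums (-1) with
    | some a, some b =>
        if !(n - a == 0) && (n + (n - a) == b) then nums else []
    | _, _ => []

-- ===== PORT B =====
def isPrimeB (n : Int) : Bool :=
  (PySem.List.pyRange 2 n 1).all (fun i => !(PySem.Int.mod n i == 0))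

-- 'while not (is_prime(n-d) or is_prime(n+d)): d += 1'; fuel is a totality guard
def expandB (n : Int) : Nat → Int → Int
  | 0, d => d
  | fuel + 1, d =>
      if !(isPrimeB (n - d) || isPrimeB (n + d)) then expandB n fuel (d + 1) else d

def interprime_alt (n : Int) : List Int :=
  if isPrimeB n then []
  else
    let d := expandB n (n.toNat + 4) 1
    if isPrimeB (n - d) && isPrimeB (n + d) then [n - d, n + d] else []

-- ===== PRECONDITION & SPEC =====
def Spec_interprime (n : Int) (out : List Int) : Prop := out = interprime_alt n
instance (n : Int) (out : List Int) : Decidable (Spec_interprime n out) := by unfold Spec_interprime; infer_instance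

-- ===== CLAIM (what is proved, stated in full; the proofs are below) =====
def Claim_equal_interprime : Prop := ∀ (n : Int), Dom_interprime n → Spec_interprime n (interprime n)

-- ===== LEMMAS AND PROOFS =====

theorem isPrimeB_eq : isPrimeB = isPrimeA := rfl

theorem isPrimeA_of_le_three {n : Int} (h : n ≤ 3) : isPrimeA n = true := by
  rcases eq_or_lt_of_le h with h3 | h2
  · subst h3; decide
  · have : n ≤ 2 := by omega
    simp [isPrimeA, PySem.List.pyRange_one_eq_nil this]

theorem four_le_of_not_prime {n : Int} (h : isPrimeA n = false) : 4 ≤ n := by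
  by_contra hlt
  have := isPrimeA_of_le_three (n := n) (by omega)
  simp [this] at h

theorem isPrimeA_of_prime {p : Nat} (hp : p.Prime) : isPrimeA (p : Int) = true := by
  unfold isPrimeA
  rw [List.all_eq_true]
  intro i hi
  rw [PySem.List.mem_pyRange_one] at hi
  simp only [Bool.not_eq_eq_eq_not, Bool.not_true, beq_eq_false_iff_ne, ne_eq]
  intro hmod
  rw [PySem.Int.mod_eq_zero_iff_dvd] at hmod
  have hi0 : (0 : Int) ≤ i := by omega
  obtain ⟨k, rfl⟩ := Int.eq_ofNat_of_zero_le hi0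
  rw [Int.natCast_dvd_natCast] at hmod
  rcases (Nat.Prime.eq_one_or_self_of_dvd hp k hmod) with h1 | h1 <;>
    (subst h1; omega)

-- first-match characterisation of A's downward for-loop
theorem firstDownA_eq (m : Int) (hm : isPrimeA m = true) (h2 : 2 < m) :
    ∀ (n : Int), m ≤ n → (∀ j, m < j → j ≤ n → isPrimeA j = false) →
      firstDownA (PySem.List.pyRange n 2 (-1)) = [m] := by
  intro n hmn
  obtain ⟨k, hk⟩ : ∃ k : Nat, (n - m).toNat = k := ⟨_, rfl⟩
  induction k generalizing n with
  | zero =>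
      intro _
      have : n = m := by omega
      subst this
      rw [PySem.List.pyRange_neg_one_cons (by omega)]
      simp [firstDownA, hm]
  | succ k ih =>
      intro hmin
      rw [PySem.List.pyRange_neg_one_cons (by omega)]
      have hn : isPrimeA n = false := hmin n (by omega) le_rfl
      simp only [firstDownA, hn, Bool.false_eq_true, if_false]
      exact ih (n - 1) (by omega) (by omega)
        (fun j hj1 hj2 => hmin j hj1 (by omega))

-- first-match characterisation of A's upward while-loop
theorem upA_eq (n : Int) :
    ∀ (fuel : Nat) (p m : Int), p ≤ m → n < p → isPrimeA m = true →
      (∀ j, p ≤ j → j < m → isPrimeA j = false) → (m - p).toNat < fuel →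
      upA n fuel p = m := by
  intro fuel
  induction fuel with
  | zero => intro p m _ _ _ _ hf; omega
  | succ fuel ih =>
      intro p m hpm hnp hm hmin hf
      unfold upA
      by_cases hp : isPrimeA p = true
      · have : p = m := by
          by_contra hne
          have := hmin p le_rfl (by omega)
          simp [this] at hp
        subst this
        simp [hp, hnp]
      · simp only [Bool.not_eq_true] at hp
        have hplt : p < m := by
          rcases eq_or_lt_of_le hpm with h | h
          · subst h; simp [hp] at hm
          · exact h
        simp only [hp, Bool.false_and, Bool.false_eq_true, if_false]
        exact ih (p + 1) m (by omega) (by omega) hm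
          (fun j hj1 hj2 => hmin j (by omega) hj2) (by omega)

-- first-match characterisation of B's outward expansion loop
theorem expandB_eq (n : Int) :
    ∀ (fuel : Nat) (d g : Int), d ≤ g →
      (isPrimeB (n - g) || isPrimeB (n + g)) = true →
      (∀ j, d ≤ j → j < g → (isPrimeB (n - j) || isPrimeB (n + j)) = false) →
      (g - d).toNat < fuel →
      expandB n fuel d = g := by
  intro fuel
  induction fuel with
  | zero => intro d g _ _ _ hf; omega
  | succ fuel ih =>
      intro d g hdg hg hmin hf
      unfold expandB
      by_cases hd : (isPrimeB (n - d) || isPrimeB (n + d)) = true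
      · have : d = g := by
          by_contra hne
          have := hmin d le_rfl (by omega)
          simp [this] at hd
        subst this
        simp [hd]
      · simp only [Bool.not_eq_true] at hd
        have hdlt : d < g := by
          rcases eq_or_lt_of_le hdg with h | h
          · subst h; simp [hd] at hg
          · exact h
        simp only [hd, Bool.not_false, if_true]
        exact ih (d + 1) g (by omega) hg
          (fun j hj1 hj2 => hmin j (by omega) hj2) (by omega)

-- ===== VERDICT (by name: the statement is the Claim_ definition above) =====
theorem interprime_spec : Claim_equal_interprime := by
  intro n _
  unfold Spec_interprime interprime interprime_alt
  rw [isPrimeB_eq]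
  by_cases hn : isPrimeA n = true
  · simp [hn]
  · simp only [Bool.not_eq_true] at hn
    have h4 : 4 ≤ n := four_le_of_not_prime hn
    -- least downward distance
    have hlowEx : ∃ k : Nat, isPrimeA (n - (1 + (k : Int))) = true := by
      refine ⟨(n - 4).toNat, ?_⟩
      have : n - (1 + ((n - 4).toNat : Int)) = 3 := by omega
      rw [this]; decide
    set klow := Nat.find hlowEx with hklow
    have hlowP : isPrimeA (n - (1 + (klow : Int))) = true := Nat.find_spec hlowEx
    have hlowMin : ∀ k : Nat, k < klow → isPrimeA (n - (1 + (k : Int))) = false := by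
      intro k hk
      have := Nat.find_min hlowEx hk
      simpa using this
    have hklow_le : klow ≤ (n - 4).toNat := Nat.find_min' hlowEx (by
      have : n - (1 + ((n - 4).toNat : Int)) = 3 := by omega
      rw [this]; decide)
    set p : Int := n - (1 + (klow : Int)) with hp
    have hp3 : 3 ≤ p := by simp only [hp]; omega
    -- least upward distance (Bertrand gives a prime in (n, 2n])
    have hhighEx : ∃ k : Nat, isPrimeA (n + 1 + (k : Int)) = true := by
      obtain ⟨pr, hpr, hlt, hle⟩ := Nat.exists_prime_lt_and_le_two_mul n.toNat (by omega)
      refine ⟨pr - n.toNat - 1, ?_⟩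
      have hcast : n + 1 + ((pr - n.toNat - 1 : Nat) : Int) = (pr : Int) := by omega
      rw [hcast]; exact isPrimeA_of_prime hpr
    set khigh := Nat.find hhighEx with hkhigh
    have hhighP : isPrimeA (n + 1 + (khigh : Int)) = true := Nat.find_spec hhighEx
    have hhighMin : ∀ k : Nat, k < khigh → isPrimeA (n + 1 + (k : Int)) = false := by
      intro k hk
      have := Nat.find_min hhighEx hk
      simpa using this
    have hkhigh_le : khigh ≤ 2 * n.toNat := by
      obtain ⟨pr, hpr, hlt, hle⟩ := Nat.exists_prime_lt_and_le_two_mul n.toNat (by omega)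
      have h1 : khigh ≤ pr - n.toNat - 1 := Nat.find_min' hhighEx (by
        have hcast : n + 1 + ((pr - n.toNat - 1 : Nat) : Int) = (pr : Int) := by omega
        rw [hcast]; exact isPrimeA_of_prime hpr)
      omega
    set q : Int := n + 1 + (khigh : Int) with hq
    -- interprime-j false for all j strictly between p and n (inclusive n)
    have hbetween : ∀ j : Int, p < j → j ≤ n → isPrimeA j = false := by
      intro j hj1 hj2
      rcases eq_or_lt_of_le hj2 with h | h
      · subst h; exact hn
      · have hk : ((n - 1 - j).toNat : Int) = n - 1 - j := by omega
        have := hlowMin (n - 1 - j).toNat (by omega)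
        have hcast : n - (1 + ((n - 1 - j).toNat : Int)) = j := by omega
        rwa [hcast] at this
    -- A's downward loop
    have hdown : firstDownA (PySem.List.pyRange n 2 (-1)) = [p] :=
      firstDownA_eq p hlowP (by omega) n (by omega) hbetween
    -- A's upward loop
    have hupMin : ∀ j : Int, n + 1 ≤ j → j < q → isPrimeA j = false := by
      intro j hj1 hj2
      have := hhighMin (j - n - 1).toNat (by omega)
      have hcast : n + 1 + (((j - n - 1).toNat : Int)) = j := by omega
      rwa [hcast] at this
    have hup : upA n (2 * n.toNat + 4) (n + 1) = q :=
      upA_eq n _ (n + 1) q (by omega) (by omega) hhighP hupMin (by omega)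
    -- B's expansion loop result
    set gk := min klow khigh with hgk
    set g : Int := 1 + (gk : Int) with hg
    have hQg : (isPrimeB (n - g) || isPrimeB (n + g)) = true := by
      rw [isPrimeB_eq]
      rcases le_total klow khigh with h | h
      · have : g = 1 + (klow : Int) := by simp [hg, hgk, min_eq_left h]
        rw [this]
        have : n - (1 + (klow : Int)) = p := rfl
        simp [this, hlowP]
      · have : g = 1 + (khigh : Int) := by simp [hg, hgk, min_eq_right h]
        rw [this]
        have hx : n + (1 + (khigh : Int)) = q := by omega
        simp [hx, hhighP]
    have hQmin : ∀ j : Int, 1 ≤ j → j < g → (isPrimeB (n - j) || isPrimeB (n + j)) = false := by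
      intro j hj1 hj2
      rw [isPrimeB_eq]
      have hkj : ((j - 1).toNat : Int) = j - 1 := by omega
      have hl := hlowMin (j - 1).toNat (by omega)
      have hh := hhighMin (j - 1).toNat (by omega)
      have hc1 : n - (1 + ((j - 1).toNat : Int)) = n - j := by omega
      have hc2 : n + 1 + ((j - 1).toNat : Int) = n + j := by omega
      rw [hc1] at hl; rw [hc2] at hh
      simp [hl, hh]
    have hexp : expandB n (n.toNat + 4) 1 = g :=
      expandB_eq n _ 1 g (by omega) hQg hQmin (by omega)
    -- assemble
    simp only [hn, Bool.false_eq_true, if_false, hdown, hup, hexp]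
    have hget0 : PySem.List.pyGet? [p, q] 0 = some p := rfl
    have hgetm1 : PySem.List.pyGet? [p, q] (-1) = some q := rfl
    simp only [List.cons_append, List.nil_append, hget0, hgetm1]
    by_cases heq : klow = khigh
    · -- interprime: both flanks prime at the same distance
      have hgl : g = 1 + (klow : Int) := by simp [hg, hgk, heq]
      have hnp : n - g = p := by rw [hgl]
      have hnq : n + g = q := by rw [hgl, heq]; omega
      have hcond : (!(n - p == 0) && (n + (n - p) == q)) = true := by
        have h1 : n - p = 1 + (klow : Int) := by omega
        have h2 : n + (n - p) = q := by rw [h1, hq, heq]; omega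
        simp [h1]
        omega
      rw [hnp, hnq]
      simp [hcond, hlowP, hhighP]
    · -- distances differ: both return []
      have hcondA : (!(n - p == 0) && (n + (n - p) == q)) = false := by
        have h1 : n + (n - p) ≠ q := by
          simp only [hp, hq]
          intro hx
          apply heq
          omega
        simp [h1]
      rw [hcondA]
      simp only [Bool.false_eq_true, if_false]
      rcases Nat.lt_or_ge klow khigh with h | h
      · -- g = lowd; upper flank not prime
        have hgl : g = 1 + (klow : Int) := by simp [hg, hgk, Nat.le_of_lt h]
        have hhx : isPrimeA (n + g) = false := by
          have := hhighMin klow h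
          have hc : n + 1 + (klow : Int) = n + g := by rw [hgl]; omega
          rwa [hc] at this
        simp [hhx]
      · have hne : khigh < klow := by omega
        have hgl : g = 1 + (khigh : Int) := by simp [hg, hgk, Nat.le_of_lt hne]
        have hlx : isPrimeA (n - g) = false := by
          have := hlowMin khigh hne
          have hc : n - (1 + (khigh : Int)) = n - g := by rw [hgl]
          rwa [hc] at this
        simp [hlx]
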